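-- pv_equiv track=rewrite | github.com/pypi-data/pypi-mirror-402 | packages/brokkr-diagnostics/brokkr_diagnostics-0.3.4.tar.gz/brokkr_diagnostics-0.3.4/pcie/diagnostics.py | parse_lspci_verbose_for_errors
-- ===== SOURCE A (Python) =====
-- from typing import Dict, List, Optional, Tuple, Union
--
-- def parse_lspci_verbose_for_errors(verbose_output: str) -> List[str]:
--     """
--     Parse lspci verbose output for PCIe errors
--     Looks for:
--     - Correctable/Uncorrectable error status
--     - Link degradation
--     - AER errors
--     """
--     errors = []
--
--     if not verbose_output:
--         return errors
--
--     lines = verbose_output.split("\n")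
--     current_device = None
--
--     for line in lines:
--         # Track current device
--         if line and not line.startswith("\t"):
--             current_device = line.split()[0] if line.split() else None
--
--         line_lower = line.lower()
--
--         # Check for error indicators
--         if "correctable" in line_lower and "error" in line_lower:
--             if "+" in line or "status" in line_lower:
--                 errors.append(f"{current_device}: Correctable error detected - {line.strip()}")
--
--         if "uncorrectable" in line_lower and "error" in line_lower:
--             if "+" in line or "status" in line_lower:
--                 errors.append(f"{current_device}: Uncorrectable error detected - {line.strip()}")
--
--         if "lnksta:" in line_lower:
--             # Parse link status for degradation
--             if "speed" in line_lower and "width" in line_lower: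
--                 errors.append(f"{current_device}: Link status - {line.strip()}")
--
--         if "aer" in line_lower and ("error" in line_lower or "fatal" in line_lower):
--             errors.append(f"{current_device}: AER event - {line.strip()}")
--
--     return errors
-- ===== SOURCE B (Python) =====
-- from typing import List, Optional
--
-- def _line_errors(dev: Optional[str], line: str) -> List[str]:
--     low = line.lower()
--     msgs = []
--     if "correctable" in low and "error" in low and ("+" in line or "status" in low):
--         msgs.append(f"{dev}: Correctable error detected - {line.strip()}")
--     if "uncorrectable" in low and "error" in low and ("+" in line or "status" in low):
--         msgs.append(f"{dev}: Uncorrectable error detected - {line.strip()}")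
--     if "lnksta:" in low and "speed" in low and "width" in low:
--         msgs.append(f"{dev}: Link status - {line.strip()}")
--     if "aer" in low and ("error" in low or "fatal" in low):
--         msgs.append(f"{dev}: AER event - {line.strip()}")
--     return msgs
--
-- def parse_lspci_verbose_for_errors(verbose_output: str) -> List[str]:
--     lines = verbose_output.split("\n")
--     # pass 1: annotate every line with the device in effect at that line
--     devices = []
--     cur = None
--     for line in lines:
--         if line and not line.startswith("\t"):
--             parts = line.split()
--             cur = parts[0] if parts else None
--         devices.append(cur)
--     # pass 2: emit the error messages
--     out = []
--     for dev, line in zip(devices, lines):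
--         out.extend(_line_errors(dev, line))
--     return out
-- ===== Notes on version B (the rewrite author's own statement) =====
-- stated objective: alternative
-- what changed: B splits A's single stateful loop into two passes: a first pass forward-fills a parallel list of per-line device annotations, and a second pass over the zipped (device, line) pairs emits the error messages via a pure per-line helper.
import Mathlib
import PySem

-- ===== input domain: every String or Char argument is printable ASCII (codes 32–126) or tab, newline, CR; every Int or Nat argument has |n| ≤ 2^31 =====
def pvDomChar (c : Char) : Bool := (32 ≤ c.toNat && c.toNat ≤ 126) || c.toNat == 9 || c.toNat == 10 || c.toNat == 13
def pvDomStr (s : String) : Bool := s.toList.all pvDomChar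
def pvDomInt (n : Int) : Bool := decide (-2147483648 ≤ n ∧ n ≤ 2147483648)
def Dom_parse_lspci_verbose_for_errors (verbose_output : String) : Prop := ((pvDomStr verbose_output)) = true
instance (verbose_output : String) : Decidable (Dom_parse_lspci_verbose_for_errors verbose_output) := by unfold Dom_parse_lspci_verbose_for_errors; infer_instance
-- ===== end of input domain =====

-- B separates device resolution (a forward-filled annotation list, pass 1) from error
-- emission (pass 2); A interleaves both in one stateful loop. Return values agree everywhere.

-- ===== PORT A =====
-- f"{current_device}": Python prints None as "None"
def pvFmtDev (dev : Option String) : String :=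
  match dev with | none => "None" | some s => s

-- 'current_device = line.split()[0] if line.split() else None' (guarded by the outer if)
def pvTrackDeviceA (line : String) (current_device : Option String) : Option String :=
  if line ≠ "" ∧ ¬ (PySem.Str.startswith line "\t" = true) then
    (match PySem.Str.split₀ line with
     | [] => none
     | w :: _ => some w)
  else current_device

-- the error-check part of A's loop body (the four appends, in order)
def pvChecksA (current_device : Option String) (line : String) (errors : List String) : List String :=
  let line_lower := PySem.Str.lower line
  let errors :=
    if (PySem.Str.isIn "correctable" line_lower && PySem.Str.isIn "error" line_lower) = true then
      (if (PySem.Str.isIn "+" line || PySem.Str.isIn "status" line_lower) = true then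
        errors ++ [pvFmtDev current_device ++ ": Correctable error detected - " ++ PySem.Str.strip line]
      else errors)
    else errors
  let errors :=
    if (PySem.Str.isIn "uncorrectable" line_lower && PySem.Str.isIn "error" line_lower) = true then
      (if (PySem.Str.isIn "+" line || PySem.Str.isIn "status" line_lower) = true then
        errors ++ [pvFmtDev current_device ++ ": Uncorrectable error detected - " ++ PySem.Str.strip line]
      else errors)
    else errors
  let errors :=
    if PySem.Str.isIn "lnksta:" line_lower = true then
      (if (PySem.Str.isIn "speed" line_lower && PySem.Str.isIn "width" line_lower) = true then
        errors ++ [pvFmtDev current_device ++ ": Link status - " ++ PySem.Str.strip line]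
      else errors)
    else errors
  if (PySem.Str.isIn "aer" line_lower && (PySem.Str.isIn "error" line_lower || PySem.Str.isIn "fatal" line_lower)) = true then
    errors ++ [pvFmtDev current_device ++ ": AER event - " ++ PySem.Str.strip line]
  else errors

-- A's single for-loop, state = (current_device, errors)
def pvLoopA : List String → Option String → List String → List String
  | [], _, errors => errors
  | line :: rest, current_device, errors =>
    let current_device := pvTrackDeviceA line current_device
    pvLoopA rest current_device (pvChecksA current_device line errors)

def parse_lspci_verbose_for_errors (verbose_output : String) : List String :=
  if verbose_output = "" then []
  else
    match PySem.Str.split? verbose_output "\n" with   -- sep = "\n" ≠ "": never none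
    | none => []
    | some lines => pvLoopA lines none []

-- ===== PORT B =====
-- pass 1: forward-fill the device annotation of every line
def pvAnnotate : List String → Option String → List (Option String × String)
  | [], _ => []
  | line :: rest, cur =>
    let cur :=
      if line ≠ "" ∧ ¬ (PySem.Str.startswith line "\t" = true) then
        (PySem.Str.split₀ line).head?
      else cur
    (cur, line) :: pvAnnotate rest cur

-- pass 2 helper: the messages one annotated line contributes
def pvLineErrors (dev : Option String) (line : String) : List String :=
  let low := PySem.Str.lower line
  let d := pvFmtDev dev
  (if (PySem.Str.isIn "correctable" low && PySem.Str.isIn "error" low &&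
      (PySem.Str.isIn "+" line || PySem.Str.isIn "status" low)) = true then
    [d ++ ": Correctable error detected - " ++ PySem.Str.strip line] else []) ++
  (if (PySem.Str.isIn "uncorrectable" low && PySem.Str.isIn "error" low &&
      (PySem.Str.isIn "+" line || PySem.Str.isIn "status" low)) = true then
    [d ++ ": Uncorrectable error detected - " ++ PySem.Str.strip line] else []) ++
  (if (PySem.Str.isIn "lnksta:" low && (PySem.Str.isIn "speed" low && PySem.Str.isIn "width" low)) = true then
    [d ++ ": Link status - " ++ PySem.Str.strip line] else []) ++
  (if (PySem.Str.isIn "aer" low && (PySem.Str.isIn "error" low || PySem.Str.isIn "fatal" low)) = true then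
    [d ++ ": AER event - " ++ PySem.Str.strip line] else [])

def parse_lspci_verbose_for_errors_alt (verbose_output : String) : List String :=
  match PySem.Str.split? verbose_output "\n" with   -- sep = "\n" ≠ "": never none
  | none => []
  | some lines =>
    (pvAnnotate lines none).foldl (fun out p => out ++ pvLineErrors p.1 p.2) []

-- ===== PRECONDITION & SPEC =====
def Spec_parse_lspci_verbose_for_errors (verbose_output : String) (out : List String) : Prop := out = parse_lspci_verbose_for_errors_alt verbose_output
instance (verbose_output : String) (out : List String) : Decidable (Spec_parse_lspci_verbose_for_errors verbose_output out) := by unfold Spec_parse_lspci_verbose_for_errors; infer_instance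

-- ===== CLAIM (what is proved, stated in full; the proofs are below) =====
def Claim_equal_parse_lspci_verbose_for_errors : Prop := ∀ (verbose_output : String), Dom_parse_lspci_verbose_for_errors verbose_output → Spec_parse_lspci_verbose_for_errors verbose_output (parse_lspci_verbose_for_errors verbose_output)

-- ===== LEMMAS AND PROOFS =====

-- A's device tracking is B's head?-formulated forward fill
theorem pvTrackDeviceA_eq (line : String) (cur : Option String) :
    pvTrackDeviceA line cur =
      (if line ≠ "" ∧ ¬ (PySem.Str.startswith line "\t" = true) then
        (PySem.Str.split₀ line).head?
      else cur) := by
  unfold pvTrackDeviceA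
  split
  · cases PySem.Str.split₀ line <;> rfl
  · rfl

-- A's two-level nested guard is a guarded singleton appended
theorem pvAppIf2 (errors : List String) (c p : Prop) [Decidable c] [Decidable p] (m : String) :
    (if c then (if p then errors ++ [m] else errors) else errors) =
      errors ++ (if c ∧ p then [m] else []) := by
  by_cases hc : c <;> by_cases hp : p <;> simp [hc, hp]

-- A's append chain for one line equals B's per-line message list
theorem pvChecksA_eq (d : Option String) (line : String) (errors : List String) :
    pvChecksA d line errors = errors ++ pvLineErrors d line := by
  simp only [pvChecksA, pvLineErrors, Bool.and_eq_true, Bool.or_eq_true]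
  simp only [pvAppIf2]
  simp only [List.append_assoc]
  split <;> simp

-- A's loop equals B's two passes, for any carried state
theorem pvLoopA_eq (lines : List String) :
    ∀ (cur : Option String) (errors : List String),
      pvLoopA lines cur errors =
        (pvAnnotate lines cur).foldl (fun out p => out ++ pvLineErrors p.1 p.2) errors := by
  induction lines with
  | nil => intro cur errors; simp [pvLoopA, pvAnnotate]
  | cons line rest ih =>
    intro cur errors
    simp only [pvLoopA, pvAnnotate, List.foldl_cons, ih, pvTrackDeviceA_eq, pvChecksA_eq]

theorem parse_lspci_verbose_for_errors_alt_empty :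
    parse_lspci_verbose_for_errors_alt "" = [] := by rfl

-- ===== VERDICT (by name: the statement is the Claim_ definition above) =====
theorem parse_lspci_verbose_for_errors_spec : Claim_equal_parse_lspci_verbose_for_errors := by
  intro s _
  unfold Spec_parse_lspci_verbose_for_errors parse_lspci_verbose_for_errors
  split
  · next h => subst h; exact (parse_lspci_verbose_for_errors_alt_empty).symm
  · unfold parse_lspci_verbose_for_errors_alt
    cases PySem.Str.split? s "\n" with
    | none => rfl
    | some lines => exact pvLoopA_eq lines none []
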